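-- pv_equiv track=rewrite | github.com/Karhdo/CS114.L22.KHCL | WeCode/Week 4.1 - Bài tập wecode cuối cùng/thợ_sửa_ống_nước.py | pipesGame
-- ===== SOURCE A (Python) =====
-- DIRECTION = {
--              'l': (0, -1),
--              'r': (0, 1),
--              'u': (-1, 0),
--              'd': (1, 0)
--             }
--
-- FLOW = {
--         'l': {'2': 'l', '3': 'd', '6': 'u', '7': 'l'},
--         'r': {'2': 'r', '4': 'd', '5': 'u', '7': 'r'},
--         'd': {'1': 'd', '5': 'l', '6': 'r', '7': 'd'},
--         'u': {'1': 'u', '3': 'r', '4': 'l', '7': 'u'}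
--        }
--
-- _IN_RANGE = lambda x, y, state: 0<=x<len(state) and 0<=y<len(state[0])
--
-- def find_starting_points(state):
--
--     pipes = list(filter(lambda x: 'a'<=x<='z',''.join(state)))
--     starts = {}
--
--     for i in range(len(state)):
--         for j in range(len(state[0])):
--             if 'a'<=state[i][j]<='z':
--                 starts[state[i][j]] = [i,j]
--
--     return starts, pipes
--
-- def follow_flow(flow, current_path, state, end, final_path):
--
--     x, y = [x+y for x,y in zip(current_path[-1], DIRECTION[flow])]
--
--     if _IN_RANGE(x, y, state) and state[x][y] == end:
--         final_path.append(current_path + [''])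
--     elif _IN_RANGE(x, y, state) and state[x][y] in FLOW[flow]:
--         return follow_flow(FLOW[flow][state[x][y]], current_path + [[x, y]], state, end, final_path)
--     else:
--         final_path.append(current_path + ['leak'])
--
--     return final_path
--
-- def sum_water(total_path):
--
--     final_cells = set()
--     first_leak = list(map(lambda x: len(x), filter(lambda x: 'leak' in x, total_path)))
--     first_leak = 0 if len(first_leak) == 0 else min(first_leak) - 1
--
--     for path in total_path:
--         path = path[:-1]
--         path = list(map(lambda x: str(x[0]) + ' ' + str(x[1]), path))
--         idx = min(first_leak, len(path)) if first_leak else len(path)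
--         final_cells |= set(path[:idx])
--
--     return len(final_cells) * (-1 if first_leak > 0 else 1)
--
-- def pipesGame(state):
--
--     starts, pipes = find_starting_points(state)
--     total_path = []
--
--     for pipe in pipes:
--         end = pipe.upper()
--         for di in DIRECTION:
--             x, y = [x+y for x,y in zip(starts[pipe], DIRECTION[di])]
--             if _IN_RANGE(x, y, state) and state[x][y] in FLOW[di]:
--                 total_path += follow_flow(FLOW[di][state[x][y]], [[x, y]], state, end, [])
--
--     return sum_water(total_path)
-- ===== SOURCE B (Python) =====
-- # B: iterative trace loop instead of A's recursion, one-pass comprehensions for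
-- # starts/pipes, and direct cut/sign logic in the water count (objective: simpler).
--
-- DIRECTION = {
--              'l': (0, -1),
--              'r': (0, 1),
--              'u': (-1, 0),
--              'd': (1, 0)
--             }
--
-- FLOW = {
--         'l': {'2': 'l', '3': 'd', '6': 'u', '7': 'l'},
--         'r': {'2': 'r', '4': 'd', '5': 'u', '7': 'r'},
--         'd': {'1': 'd', '5': 'l', '6': 'r', '7': 'd'},
--         'u': {'1': 'u', '3': 'r', '4': 'l', '7': 'u'}
--        }
--
-- def pipesGame(state):
--     height, width = len(state), len(state[0])
--     starts = {c: (i, j) for i, row in enumerate(state)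
--                         for j, c in enumerate(row[:width]) if 'a' <= c <= 'z'}
--     pipes = [c for row in state for c in row if 'a' <= c <= 'z']
--
--     paths = []
--     for pipe in pipes:
--         si, sj = starts[pipe]
--         end = pipe.upper()
--         for d in 'lrud':
--             x, y = si + DIRECTION[d][0], sj + DIRECTION[d][1]
--             if not (0 <= x < height and 0 <= y < width and state[x][y] in FLOW[d]):
--                 continue
--             flow = FLOW[d][state[x][y]]
--             cells = [(x, y)]
--             ok = None
--             while ok is None:
--                 x, y = cells[-1][0] + DIRECTION[flow][0], cells[-1][1] + DIRECTION[flow][1]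
--                 if 0 <= x < height and 0 <= y < width and state[x][y] == end:
--                     ok = True
--                 elif 0 <= x < height and 0 <= y < width and state[x][y] in FLOW[flow]:
--                     flow = FLOW[flow][state[x][y]]
--                     cells.append((x, y))
--                 else:
--                     ok = False
--             paths.append((cells, ok))
--
--     leaks = [len(cells) for cells, ok in paths if not ok]
--     cut = min(leaks) if leaks else None
--     filled = set()
--     for cells, _ in paths:
--         filled.update(str(x) + ' ' + str(y)
--                       for x, y in (cells if cut is None else cells[:cut]))
--     return -len(filled) if leaks else len(filled)
-- ===== Notes on version B (the rewrite author's own statement) =====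
-- stated objective: simpler
-- what changed: follow_flow's recursion with a final_path accumulator and heterogeneous sentinel-terminated paths becomes an iterative while-loop trace returning (cells, ok) pairs; starts/pipes are built by single comprehensions over enumerated rows, and the leak cutoff and sign are computed directly from the pairs instead of via sentinel membership and len()-1 arithmetic.
-- outside the precondition, e.g. on pipesGame([]): A returns 0, B raises IndexError; on pipesGame(['34', '65', 'aA']): A returns 0, B returns 0
import Mathlib
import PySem

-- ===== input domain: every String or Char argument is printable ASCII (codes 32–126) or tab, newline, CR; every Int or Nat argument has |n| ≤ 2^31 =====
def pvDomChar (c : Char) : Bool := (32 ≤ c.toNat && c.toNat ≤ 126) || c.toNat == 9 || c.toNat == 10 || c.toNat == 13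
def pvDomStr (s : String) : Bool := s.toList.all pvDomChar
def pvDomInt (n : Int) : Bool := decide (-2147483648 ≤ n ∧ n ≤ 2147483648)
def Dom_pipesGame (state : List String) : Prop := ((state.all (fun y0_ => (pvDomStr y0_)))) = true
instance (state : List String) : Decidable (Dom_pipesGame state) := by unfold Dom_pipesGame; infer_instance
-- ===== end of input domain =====

-- B rewrites the recursive follow_flow as an iterative trace returning (cells, ok) pairs,
-- builds starts/pipes by single comprehensions, and derives the leak cutoff and sign
-- directly from those pairs (objective: simpler; return-value equivalence only).

-- ===== PORT A =====
-- shared module constants DIRECTION / FLOW and the helper lambdas of Source A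
def pvDir (d : Char) : Int × Int :=
  if d = 'l' then (0, -1) else if d = 'r' then (0, 1) else if d = 'u' then (-1, 0) else (1, 0)

-- FLOW[d].get(c): some = membership 'c in FLOW[d]' with the mapped direction
def pvFlow (d c : Char) : Option Char :=
  if d = 'l' then
    if c = '2' then some 'l' else if c = '3' then some 'd' else if c = '6' then some 'u' else if c = '7' then some 'l' else none
  else if d = 'r' then
    if c = '2' then some 'r' else if c = '4' then some 'd' else if c = '5' then some 'u' else if c = '7' then some 'r' else none
  else if d = 'd' then
    if c = '1' then some 'd' else if c = '5' then some 'l' else if c = '6' then some 'r' else if c = '7' then some 'd' else none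
  else
    if c = '1' then some 'u' else if c = '3' then some 'r' else if c = '4' then some 'l' else if c = '7' then some 'u' else none

def pvLower (c : Char) : Bool := decide ('a' ≤ c) && decide (c ≤ 'z')  -- 'a'<=c<='z'
def pvWidth (state : List String) : Nat := (state.headD "").toList.length  -- len(state[0]); total via headD, Pre_ demands state ≠ []
def pvInRange (state : List String) (x y : Int) : Bool :=               -- _IN_RANGE
  decide (0 ≤ x) && decide (x < (state.length : Int)) && decide (0 ≤ y) && decide (y < (pvWidth state : Int))
def pvCell (state : List String) (x y : Int) : Char :=                  -- state[x][y]; only used under pvInRange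
  (state.getD x.toNat "").toList.getD y.toNat ' '
def pvKey (q : Int × Int) : List Char :=                                -- str(x) + ' ' + str(y)  (strings on the List Char side)
  PySem.Int.toChars q.1 ++ ' ' :: PySem.Int.toChars q.2
def pvFuel (state : List String) : Nat := state.length * pvWidth state * 4 + 1
  -- fuel guard: 4*h*w+1 bounds every acyclic flow; Pre_ excludes cyclic grids (Python recurses forever there)

def pvFindStartingPoints (state : List String) : PySem.Dict Char (Int × Int) × List Char :=
  let pipes := ((state.map String.toList).flatten).filter pvLower
  let starts := (PySem.List.pyRange 0 (PySem.List.len state) 1).foldl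
    (fun d i => (PySem.List.pyRange 0 ((pvWidth state : Int)) 1).foldl
      (fun d j => if pvLower (pvCell state i j) then d.insert (pvCell state i j) (i, j) else d) d)
    PySem.Dict.empty
  (starts, pipes)

-- follow_flow; paths are (cells, tag) with tag true = '' (reached end), false = 'leak'
def pvFollowFlow (state : List String) (endc : Char) :
    Nat → Char → List (Int × Int) → List (List (Int × Int) × Bool) → List (List (Int × Int) × Bool)
  | 0, _, cur, final => final ++ [(cur, false)]   -- fuel exhausted: unreachable under Pre_ (acyclic grids)
  | fuel + 1, flow, cur, final =>
    let p := PySem.List.pyGetD cur (-1) (0, 0)    -- current_path[-1]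
    let x := p.1 + (pvDir flow).1
    let y := p.2 + (pvDir flow).2
    if pvInRange state x y && (pvCell state x y == endc) then final ++ [(cur, true)]
    else if pvInRange state x y && (pvFlow flow (pvCell state x y)).isSome then
      pvFollowFlow state endc fuel ((pvFlow flow (pvCell state x y)).getD 'l') (cur ++ [(x, y)]) final
    else final ++ [(cur, false)]

def pvSumWater (total : List (List (Int × Int) × Bool)) : Int :=
  -- len(x) of a leaking path counts its cells plus the 'leak' sentinel, hence + 1
  let firstLeakL := (total.filter (fun p => p.2 == false)).map (fun p => PySem.List.len p.1 + 1)
  let firstLeak : Int := if firstLeakL.length = 0 then 0 else (PySem.List.min? firstLeakL (fun v => v)).getD 0 - 1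
  let finalCells := total.foldl (fun (acc : PySem.Set (List Char)) p =>
      let path := p.1.map pvKey                   -- path[:-1] (the cells) mapped to "x y" strings
      let idx : Int := if firstLeak ≠ 0 then min firstLeak (PySem.List.len path) else PySem.List.len path
      PySem.Set.union acc (PySem.Set.ofList (PySem.List.slice path none (some idx)))) PySem.Set.empty
  PySem.Set.len finalCells * (if firstLeak > 0 then -1 else 1)

def pvTotalPath (state : List String) (starts : PySem.Dict Char (Int × Int)) (pipes : List Char) :
    List (List (Int × Int) × Bool) :=
  pipes.foldl (fun total pipe =>
    let endc := pipe.toUpper                      -- pipe.upper(): exact on the ASCII letters pvLower admits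
    (['l', 'r', 'u', 'd']).foldl (fun total di =>
      let s := starts.getD pipe (0, 0)            -- starts[pipe]; KeyError excluded by Pre_
      let x := s.1 + (pvDir di).1
      let y := s.2 + (pvDir di).2
      if pvInRange state x y && (pvFlow di (pvCell state x y)).isSome then
        total ++ pvFollowFlow state endc (pvFuel state) ((pvFlow di (pvCell state x y)).getD 'l') [(x, y)] []
      else total) total) []

def pipesGame (state : List String) : Int :=
  pvSumWater (pvTotalPath state (pvFindStartingPoints state).1 (pvFindStartingPoints state).2)

-- ===== PORT B =====
def pvStartsAlt (state : List String) : PySem.Dict Char (Int × Int) :=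
  (PySem.List.enumerate state).foldl
    (fun d ir => (PySem.List.enumerate (ir.2.toList.take (pvWidth state))).foldl
      (fun d jc => if pvLower jc.2 then d.insert jc.2 (ir.1, jc.1) else d) d)
    PySem.Dict.empty

-- the while loop of Source B: one traced path, returned as (cells, ok)
def pvTrace (state : List String) (endc : Char) :
    Nat → Char → List (Int × Int) → List (Int × Int) × Bool
  | 0, _, cells => (cells, false)                 -- fuel guard; unreachable under Pre_ (acyclic grids)
  | fuel + 1, flow, cells =>
    let p := PySem.List.pyGetD cells (-1) (0, 0)  -- cells[-1]
    let x := p.1 + (pvDir flow).1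
    let y := p.2 + (pvDir flow).2
    if pvInRange state x y && (pvCell state x y == endc) then (cells, true)
    else if pvInRange state x y && (pvFlow flow (pvCell state x y)).isSome then
      pvTrace state endc fuel ((pvFlow flow (pvCell state x y)).getD 'l') (cells ++ [(x, y)])
    else (cells, false)

def pvPathsAlt (state : List String) (starts : PySem.Dict Char (Int × Int)) (pipes : List Char) :
    List (List (Int × Int) × Bool) :=
  pipes.foldl (fun paths pipe =>
    let endc := pipe.toUpper
    (['l', 'r', 'u', 'd']).foldl (fun paths di =>
      let s := starts.getD pipe (0, 0)
      let x := s.1 + (pvDir di).1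
      let y := s.2 + (pvDir di).2
      if pvInRange state x y && (pvFlow di (pvCell state x y)).isSome then
        paths ++ [pvTrace state endc (pvFuel state) ((pvFlow di (pvCell state x y)).getD 'l') [(x, y)]]
      else paths) paths) []

def pvCount (paths : List (List (Int × Int) × Bool)) : Int :=
  let leaks := (paths.filter (fun p => p.2 == false)).map (fun p => (p.1.length : Int))
  let cut := PySem.List.min? leaks (fun v => v)   -- min(leaks) if leaks else None
  let filled := paths.foldl (fun (acc : PySem.Set (List Char)) p =>
      PySem.Set.update acc ((match cut with
        | none => p.1
        | some c => p.1.take c.toNat).map pvKey)) PySem.Set.empty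
  match cut with
  | some _ => -(PySem.Set.len filled)
  | none => PySem.Set.len filled

def pipesGame_alt (state : List String) : Int :=
  pvCount (pvPathsAlt state (pvStartsAlt state)
    (state.flatMap (fun row => row.toList.filter pvLower)))

-- ===== PRECONDITION & SPEC =====
-- one deterministic flow step on (x, y, direction); used only to state acyclicity of the grid's pipe graph
def pvStep (state : List String) (s : Int × Int × Char) : Option (Int × Int × Char) :=
  let x := s.1 + (pvDir s.2.2).1
  let y := s.2.1 + (pvDir s.2.2).2
  if pvInRange state x y then
    match pvFlow s.2.2 (pvCell state x y) with
    | some f => some (x, y, f)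
    | none => none
  else none

def pvIter (state : List String) : Nat → Option (Int × Int × Char) → Option (Int × Int × Char)
  | 0, o => o
  | n + 1, o => pvIter state n (o.bind (pvStep state))

-- 'the pipe graph has no directed cycle': from every cell/direction the flow dies out within 4*h*w+1 steps
def pvNoCycle (state : List String) : Bool :=
  (List.range state.length).all fun i =>
    (List.range (pvWidth state)).all fun j =>
      (['l', 'r', 'u', 'd']).all fun d =>
        (pvIter state (pvFuel state) (some ((i : Int), (j : Int), d))).isNone

-- Pre_ excludes: the empty grid (A returns 0 from empty loops, B's len(state[0]) raises IndexError);
-- grids with a row shorter than row 0 or a pipe letter occurring only beyond row 0's width (A raises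
-- IndexError resp. KeyError); and grids whose pipe graph contains a directed cycle, on which A recurses
-- forever — for simplicity any cycle is excluded, even one no pipe's flow reaches.
def Pre_pipesGame (state : List String) : Prop :=
  state ≠ [] ∧
  (state.all fun row => decide (pvWidth state ≤ row.toList.length)) = true ∧
  (state.all fun row => row.toList.all fun c =>
     !pvLower c || state.any fun r => (r.toList.take (pvWidth state)).contains c) = true ∧
  pvNoCycle state = true

instance (state : List String) : Decidable (Pre_pipesGame state) := by
  unfold Pre_pipesGame; infer_instance

def pvWitness_pipesGame : List String := ["a2A"]

def Spec_pipesGame (state : List String) (out : Int) : Prop := out = pipesGame_alt state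
instance (state : List String) (out : Int) : Decidable (Spec_pipesGame state out) := by
  unfold Spec_pipesGame; infer_instance

-- ===== CLAIM (what is proved, stated in full; the proofs are below) =====
def Claim_equal_pipesGame : Prop :=
  ∀ (state : List String), Dom_pipesGame state → Pre_pipesGame state →
    Spec_pipesGame state (pipesGame state)

-- ===== LEMMAS AND PROOFS =====
lemma pv_pipes_eq (state : List String) :
    ((state.map String.toList).flatten).filter pvLower
      = state.flatMap (fun row => row.toList.filter pvLower) := by
  simp [List.filter_flatten, List.flatMap_def, List.map_map, Function.comp_def]

lemma pv_follow_eq (state : List String) (endc : Char) :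
    ∀ (fuel : Nat) (flow : Char) (cur : List (Int × Int)) (final : List (List (Int × Int) × Bool)),
      pvFollowFlow state endc fuel flow cur final = final ++ [pvTrace state endc fuel flow cur] := by
  intro fuel
  induction fuel with
  | zero => intro flow cur final; rfl
  | succ n ih =>
    intro flow cur final
    simp only [pvFollowFlow, pvTrace]
    split_ifs <;> simp [ih]

lemma pv_loop_eq (state : List String) (starts : PySem.Dict Char (Int × Int)) (pipes : List Char) :
    pvTotalPath state starts pipes = pvPathsAlt state starts pipes := by
  unfold pvTotalPath pvPathsAlt
  refine PySem.List.foldl_congr_mem _ _ _ _ ?_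
  intro acc pipe _
  refine PySem.List.foldl_congr_mem _ _ _ _ ?_
  intro acc2 di _
  simp only [pv_follow_eq, List.nil_append]

lemma pv_trace_ne (state : List String) (endc : Char) :
    ∀ (fuel : Nat) (flow : Char) (cells : List (Int × Int)), cells ≠ [] →
      (pvTrace state endc fuel flow cells).1 ≠ [] := by
  intro fuel
  induction fuel with
  | zero => intro flow cells h; exact h
  | succ n ih =>
    intro flow cells h
    simp only [pvTrace]
    split_ifs with h1 h2
    · exact h
    · exact ih _ _ (by simp)
    · exact h

lemma pv_foldl_mem_or {α β : Type} (P : β → Prop) (step : List β → α → List β)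
    (hs : ∀ (acc : List β) (x : α) (p : β), p ∈ step acc x → p ∈ acc ∨ P p) :
    ∀ (l : List α) (acc : List β) (p : β), p ∈ l.foldl step acc → p ∈ acc ∨ P p := by
  intro l
  induction l with
  | nil => intro acc p h; exact Or.inl h
  | cons x t ih =>
    intro acc p h
    rcases ih (step acc x) p h with h' | h'
    · exact hs acc x p h'
    · exact Or.inr h'

lemma pv_paths_inv (state : List String) (starts : PySem.Dict Char (Int × Int)) (pipes : List Char) :
    ∀ p ∈ pvPathsAlt state starts pipes, p.1 ≠ ([] : List (Int × Int)) := by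
  intro p hp
  unfold pvPathsAlt at hp
  have main := pv_foldl_mem_or (fun q => q.1 ≠ ([] : List (Int × Int))) _ ?_ pipes [] p hp
  · rcases main with h | h
    · simp at h
    · exact h
  · intro acc pipe q hq
    refine pv_foldl_mem_or (fun q => q.1 ≠ ([] : List (Int × Int))) _ ?_ _ _ _ hq
    intro acc2 di q2 hq2
    dsimp only at hq2
    split at hq2
    · rcases List.mem_append.1 hq2 with h | h
      · exact Or.inl h
      · right
        rw [List.mem_singleton.1 h]
        exact pv_trace_ne _ _ _ _ _ (by simp)
    · exact Or.inl hq2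

lemma pv_foldl_min_add_one : ∀ (t : List Int) (x : Int),
    List.foldl min (x + 1) (t.map (fun v => v + 1)) = (List.foldl min x t) + 1 := by
  intro t
  induction t with
  | nil => intro x; rfl
  | cons y t ih =>
    intro x
    simp only [List.map_cons, List.foldl_cons]
    rw [show min (x + 1) (y + 1) = (min x y) + 1 by omega]
    exact ih (min x y)

lemma pv_min?_map_add_one (l : List Int) :
    PySem.List.min? (l.map (fun v => v + 1)) (fun v => v)
      = (PySem.List.min? l (fun v => v)).map (fun v => v + 1) := by
  cases l with
  | nil => rfl
  | cons x t =>
    rw [List.map_cons, PySem.List.min?_id_cons, PySem.List.min?_id_cons]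
    simp [pv_foldl_min_add_one]

lemma pv_update_ofList {α : Type} [BEq α] [LawfulBEq α] (s : PySem.Set α) (l : List α) :
    PySem.Set.update s (PySem.Set.ofList l) = PySem.Set.update s l := by
  rw [PySem.Set.update_eq_append_filter, PySem.Set.update_eq_append_filter,
    PySem.Set.ofList_ofList]

lemma pv_sum_eq (paths : List (List (Int × Int) × Bool))
    (hne : ∀ p ∈ paths, p.1 ≠ ([] : List (Int × Int))) :
    pvSumWater paths = pvCount paths := by
  have hmap : (paths.filter (fun p => p.2 == false)).map (fun p => PySem.List.len p.1 + 1)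
      = ((paths.filter (fun p => p.2 == false)).map (fun p => (p.1.length : Int))).map
          (fun v => v + 1) := by
    simp [List.map_map, PySem.List.len_eq, Function.comp_def]
  simp only [pvSumWater, pvCount]
  rw [hmap, pv_min?_map_add_one]
  cases hcut : PySem.List.min?
      ((paths.filter (fun p => p.2 == false)).map (fun p => (p.1.length : Int)))
      (fun v => v) with
  | none =>
    have hB : (paths.filter (fun p => p.2 == false)).map (fun p => (p.1.length : Int)) = [] :=
      (PySem.List.min?_eq_none_iff _ _).1 hcut
    rw [hB, List.map_nil, List.length_nil, if_pos (rfl : (0 : Nat) = 0)]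
    simp only [if_neg (by omega : ¬ ((0 : Int) ≠ 0)), if_neg (by omega : ¬ ((0 : Int) > 0)),
      mul_one]
    have hfa0 : (fun (acc : PySem.Set (List Char)) (p : List (Int × Int) × Bool) =>
        PySem.Set.union acc (PySem.Set.ofList (PySem.List.slice (p.1.map pvKey) none
          (some (PySem.List.len (p.1.map pvKey))))))
        = (fun (acc : PySem.Set (List Char)) (p : List (Int × Int) × Bool) =>
            PySem.Set.update acc (p.1.map pvKey)) := by
      funext acc p
      rw [PySem.List.len_eq, PySem.List.slice_to (p.1.map pvKey) (Int.natCast_nonneg _)]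
      simp only [Int.toNat_natCast]
      rw [List.take_length]
      simp [PySem.Set.union, pv_update_ofList]
    rw [hfa0]
  | some m =>
    have hm : m ∈ (paths.filter (fun p => p.2 == false)).map (fun p => (p.1.length : Int)) :=
      PySem.List.min?_mem hcut
    obtain ⟨p0, hp0, hp0e⟩ := List.mem_map.1 hm
    have hp0p : p0 ∈ paths := (List.mem_filter.1 hp0).1
    have hp0ne : p0.1.length ≠ 0 := by
      intro h
      exact hne p0 hp0p (List.length_eq_zero_iff.1 h)
    have h1m : 1 ≤ m := by omega
    have hBne : (paths.filter (fun p => p.2 == false)).map (fun p => (p.1.length : Int)) ≠ [] :=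
      List.ne_nil_of_mem hm
    have hcond : ¬ ((((paths.filter (fun p => p.2 == false)).map
        (fun p => (p.1.length : Int))).map (fun v => v + 1)).length = 0) := by
      intro h
      exact hBne (List.map_eq_nil_iff.1 (List.length_eq_zero_iff.1 h))
    rw [if_neg hcond, Option.map_some, Option.getD_some, add_sub_cancel_right]
    simp only [if_pos (by omega : m ≠ (0 : Int)), if_pos (by omega : m > (0 : Int)),
      mul_neg_one]
    have hfa : (fun (acc : PySem.Set (List Char)) (p : List (Int × Int) × Bool) =>
        PySem.Set.union acc (PySem.Set.ofList (PySem.List.slice (p.1.map pvKey) none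
          (some (min m (PySem.List.len (p.1.map pvKey)))))))
        = (fun (acc : PySem.Set (List Char)) (p : List (Int × Int) × Bool) =>
            PySem.Set.update acc ((p.1.take m.toNat).map pvKey)) := by
      funext acc p
      rw [PySem.List.len_eq]
      have h0 : (0 : Int) ≤ min m ((p.1.map pvKey).length : Int) :=
        le_min (by omega) (Int.natCast_nonneg _)
      rw [PySem.List.slice_to (p.1.map pvKey) h0]
      have htn : (min m ((p.1.map pvKey).length : Int)).toNat
          = min m.toNat (p.1.map pvKey).length := by omega
      rw [htn, ← List.take_take, List.take_length]
      simp [PySem.Set.union, pv_update_ofList, List.map_take]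
    rw [hfa]

lemma pv_starts_eq (state : List String)
    (hw : ∀ row ∈ state, pvWidth state ≤ row.toList.length) :
    (pvFindStartingPoints state).1 = pvStartsAlt state := by
  unfold pvFindStartingPoints pvStartsAlt
  dsimp only
  rw [PySem.List.enumerate_eq_map_pyRange state "", List.foldl_map]
  refine PySem.List.foldl_congr_mem _ _ _ _ ?_
  intro d i hi
  have h0 : 0 ≤ i := (PySem.List.mem_pyRange_one.1 hi).1
  have hlt : i < (state.length : Int) := by
    have := (PySem.List.mem_pyRange_one.1 hi).2
    simpa [PySem.List.len_eq] using this
  obtain ⟨n, rfl⟩ : ∃ n : ℕ, i = (n : Int) := ⟨i.toNat, (Int.toNat_of_nonneg h0).symm⟩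
  have hn : n < state.length := by exact_mod_cast hlt
  rw [PySem.List.pyGetD_natCast]
  have hrowmem : state.getD n "" ∈ state := by
    rw [List.getD_eq_getElem?_getD, List.getElem?_eq_getElem hn]
    simp
  rw [PySem.List.enumerate_eq_map_pyRange _ ' ', List.foldl_map]
  have hlen : PySem.List.len ((state.getD n "").toList.take (pvWidth state))
      = ((pvWidth state : Nat) : Int) := by
    rw [PySem.List.len_eq, List.length_take, Nat.min_eq_left (hw _ hrowmem)]
  rw [hlen]
  refine PySem.List.foldl_congr_mem _ _ _ _ ?_
  intro d2 j hj
  have h0j : 0 ≤ j := (PySem.List.mem_pyRange_one.1 hj).1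
  have hltj : j < ((pvWidth state : Nat) : Int) := (PySem.List.mem_pyRange_one.1 hj).2
  obtain ⟨k, rfl⟩ : ∃ k : ℕ, j = (k : Int) := ⟨j.toNat, (Int.toNat_of_nonneg h0j).symm⟩
  have hk : k < pvWidth state := by exact_mod_cast hltj
  rw [PySem.List.pyGetD_natCast]
  have hget : ((state.getD n "").toList.take (pvWidth state)).getD k ' '
      = (state.getD n "").toList.getD k ' ' := by
    simp [List.getD_eq_getElem?_getD, hk]
  rw [hget]
  simp [pvCell]

-- ===== VERDICT (by name: the statement is the Claim_ definition above) =====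
theorem pipesGame_spec : Claim_equal_pipesGame := by
  intro state _ hPre
  unfold Spec_pipesGame
  have hw : ∀ row ∈ state, pvWidth state ≤ row.toList.length := by
    have h := hPre.2.1
    simpa [List.all_eq_true] using h
  show pipesGame state = pipesGame_alt state
  unfold pipesGame pipesGame_alt
  have h2 : (pvFindStartingPoints state).2
      = state.flatMap (fun row => row.toList.filter pvLower) := pv_pipes_eq state
  rw [h2, pv_starts_eq state hw, pv_loop_eq]
  exact pv_sum_eq _ (pv_paths_inv state _ _)
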